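-- pv_equiv track=rewrite | github.com/sweta1609/recursion-assignment | checkAB.py | checkAB
-- ===== SOURCE A (Python) =====
-- def checkAB(s):
--     if len(s) == 0:
--         return 1
--     if s[0] == 'a':
--         if len(s[1:]) > 1 and s[1:3] == 'bb':
--             return checkAB(s[3:])
--         else:
--             return checkAB(s[1:])
--     else:
--         return 0
-- ===== SOURCE B (Python) =====
-- def checkAB(s):
--     i, n = 0, len(s)
--     while i < n:
--         if s[i] != 'a':
--             return 0
--         if s[i+1:i+3] == 'bb':
--             i += 3
--         else:
--             i += 1
--     return 1
-- ===== Notes on version B (the rewrite author's own statement) =====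
-- stated objective: faster
-- what changed: Replaced the recursive implementation that repeatedly slices the string with a single iterative index-based scan that never copies the string.
import Mathlib
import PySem

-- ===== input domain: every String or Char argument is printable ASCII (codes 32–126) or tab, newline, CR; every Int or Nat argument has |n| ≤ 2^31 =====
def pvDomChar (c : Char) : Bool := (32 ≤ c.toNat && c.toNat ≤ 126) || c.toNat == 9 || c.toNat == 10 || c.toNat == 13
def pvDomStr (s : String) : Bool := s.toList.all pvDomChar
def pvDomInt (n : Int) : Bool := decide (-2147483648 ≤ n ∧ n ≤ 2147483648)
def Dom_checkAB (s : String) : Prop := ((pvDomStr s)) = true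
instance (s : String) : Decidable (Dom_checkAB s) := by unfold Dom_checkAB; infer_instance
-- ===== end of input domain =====

-- B replaces A's recursive string-slicing with an iterative index-based scan (no slicing of the tail); objective: faster.

-- ===== PORT A =====
-- A's recursion on the string, slicing the tail; the slices s[1:], s[1:3], s[3:] become
-- List.drop / List.take on the character list (exact here: all indices are nonnegative).
def checkABrec (l : List Char) : Int :=
  match l with
  | [] => 1
  | c :: rest =>
    if c = 'a' then
      if rest.length > 1 ∧ rest.take 2 = ['b', 'b'] then checkABrec (rest.drop 2)
      else checkABrec rest
    else 0
termination_by l.length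
decreasing_by
  · simp only [List.length_drop, List.length_cons]; omega
  · simp only [List.length_cons]; omega

def checkAB (s : String) : Int := checkABrec s.toList

-- ===== PORT B =====
-- B's while-loop over an index i; s[i+1:i+3] becomes take 2 of drop (i+1) (exact: indices nonnegative).
def checkABloop (l : List Char) (i : Nat) : Int :=
  if h : i < l.length then
    if l[i]'h = 'a' then
      if (l.drop (i+1)).take 2 = ['b', 'b'] then checkABloop l (i+3)
      else checkABloop l (i+1)
    else 0
  else 1
termination_by l.length - i

def checkAB_alt (s : String) : Int := checkABloop s.toList 0

-- ===== PRECONDITION & SPEC =====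
def Spec_checkAB (s : String) (out : Int) : Prop := out = checkAB_alt s
instance (s : String) (out : Int) : Decidable (Spec_checkAB s out) := by unfold Spec_checkAB; infer_instance

-- ===== CLAIM (what is proved, stated in full; the proofs are below) =====
def Claim_equal_checkAB : Prop := ∀ (s : String), Dom_checkAB s → Spec_checkAB s (checkAB s)

-- ===== LEMMAS AND PROOFS =====

-- the loop at index i computes A's recursion on the suffix from i
theorem checkABloop_eq (l : List Char) (i : Nat) :
    checkABloop l i = checkABrec (l.drop i) := by
  induction i using checkABloop.induct (l := l) with
  | case1 i h hc htk ih =>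
    rw [checkABloop, dif_pos h, if_pos hc, if_pos htk, ih]
    rw [List.drop_eq_getElem_cons h, checkABrec]
    have h2 : (List.take 2 (List.drop (i+1) l)).length = 2 := by rw [htk]; rfl
    rw [List.length_take] at h2
    have hlen : 1 < (List.drop (i+1) l).length := by omega
    rw [if_pos hc, if_pos ⟨hlen, htk⟩, List.drop_drop]
  | case2 i h hc htk ih =>
    rw [checkABloop, dif_pos h, if_pos hc, if_neg htk, ih]
    rw [List.drop_eq_getElem_cons h, checkABrec]
    have hno : ¬ ((List.drop (i+1) l).length > 1 ∧ List.take 2 (List.drop (i+1) l) = ['b', 'b']) := by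
      intro hand; exact htk hand.2
    rw [if_pos hc, if_neg hno]
  | case3 i h hc =>
    rw [checkABloop, dif_pos h, if_neg hc]
    rw [List.drop_eq_getElem_cons h, checkABrec, if_neg hc]
  | case4 i h =>
    have hnil : l.drop i = [] := List.drop_eq_nil_of_le (by omega)
    rw [checkABloop, dif_neg h, hnil]
    simp [checkABrec]

-- ===== VERDICT (by name: the statement is the Claim_ definition above) =====
theorem checkAB_spec : Claim_equal_checkAB := by
  intro s _
  unfold Spec_checkAB checkAB checkAB_alt
  rw [checkABloop_eq, List.drop_zero]
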